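-- pv_equiv track=rewrite | github.com/prashanthr11/Leetcode_solutions | 0151-reverse-words-in-a-string/0151-reverse-words-in-a-string.py | custom_strip
-- ===== SOURCE A (Python) =====
-- def custom_strip(lst):
--     i, j, ln = 0, 0, len(lst)
--     last_i = -1
--
--     while j < ln:
--         while j < ln and lst[j] == " ":
--             j += 1
--
--         if j < ln and last_i == i:
--             lst[i] = " "
--             i += 1
--
--         while j < ln and lst[j] != " ":
--             lst[i] = lst[j]
--             i += 1
--             j += 1
--             last_i = i
--
--     return lst[:i]
-- ===== SOURCE B (Python) =====
-- # Groups consecutive non-" " elements into runs, then joins runs with a single " ";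
-- # mirrors A's in-place mutation by overwriting only the compacted prefix of lst.
-- def custom_strip(lst):
--     runs, cur = [], []
--     for x in lst:
--         if x == " ":
--             if cur:
--                 runs.append(cur)
--                 cur = []
--         else:
--             cur.append(x)
--     if cur:
--         runs.append(cur)
--     out = []
--     for r in runs:
--         if out:
--             out.append(" ")
--         out += r
--     lst[:len(out)] = out
--     return lst[:len(out)]
-- ===== Notes on version B (the rewrite author's own statement) =====
-- stated objective: alternative
-- what changed: Replaces A's in-place two-pointer compaction (skip spaces / write separator / copy word over the prefix) by a tokenize-then-join pass: group consecutive non-" " elements into runs, join runs with a single " ", and replicate A's prefix mutation with one slice assignment.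
import Mathlib
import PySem

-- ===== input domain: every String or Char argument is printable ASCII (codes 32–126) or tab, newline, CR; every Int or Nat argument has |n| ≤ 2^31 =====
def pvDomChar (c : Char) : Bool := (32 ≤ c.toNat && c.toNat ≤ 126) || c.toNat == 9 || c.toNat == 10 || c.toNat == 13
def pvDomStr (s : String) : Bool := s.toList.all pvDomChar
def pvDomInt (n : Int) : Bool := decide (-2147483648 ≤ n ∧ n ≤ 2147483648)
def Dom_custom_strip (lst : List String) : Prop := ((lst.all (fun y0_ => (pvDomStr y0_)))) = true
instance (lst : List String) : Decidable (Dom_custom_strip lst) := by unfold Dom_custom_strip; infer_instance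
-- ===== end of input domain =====

-- B replaces A's in-place two-pointer compaction by a tokenize-then-join pass (group the
-- non-" " elements into runs, join runs with single " "); equivalence is about the RETURN
-- value (Source B replicates A's prefix mutation via a slice assignment).

-- ===== PORT A =====
-- The three while loops are ported as structural recursion on a fuel counter that only
-- guards totality: fuel ln (resp. lst.length + 1) bounds the iteration count of each loop,
-- since j advances by one per iteration (outer loop: at least one index per unfolding from
-- the initial state), so the ports compute exactly what the Python loops compute.

-- inner while: skip elements equal to " " (lst[j] read as getD: j < ln = lst.length, exact)
def skipA (fuel : Nat) (lst : List String) (ln j : Nat) : Nat :=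
  match fuel with
  | 0 => j
  | fuel + 1 => if j < ln ∧ lst.getD j "" = " " then skipA fuel lst ln (j + 1) else j

-- inner while: copy a word; state (lst, i, j, last_i); writes lst[i] via List.set (i < ln, exact)
def copyA (fuel : Nat) (lst : List String) (ln i j : Nat) (last : Int) :
    List String × Nat × Nat × Int :=
  match fuel with
  | 0 => (lst, i, j, last)
  | fuel + 1 =>
    if j < ln ∧ lst.getD j "" ≠ " " then
      copyA fuel (lst.set i (lst.getD j "")) ln (i + 1) (j + 1) ((i : Int) + 1)
    else (lst, i, j, last)

-- one body of the outer while loop: skip spaces, maybe write a separator, copy the word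
def stepA (lst : List String) (ln i j : Nat) (last : Int) :
    List String × Nat × Nat × Int :=
  let j1 := skipA ln lst ln j
  let p := if j1 < ln ∧ last = (i : Int) then (lst.set i " ", i + 1) else (lst, i)
  copyA ln p.1 ln p.2 j1 last

-- outer while loop of A
def outerA (fuel : Nat) (lst : List String) (ln i j : Nat) (last : Int) : List String × Nat :=
  match fuel with
  | 0 => (lst, i)
  | fuel + 1 =>
    if j < ln then
      let c := stepA lst ln i j last
      outerA fuel c.1 ln c.2.1 c.2.2.1 c.2.2.2
    else (lst, i)

def custom_strip (lst : List String) : List String :=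
  let ln := lst.length
  let r := outerA (ln + 1) lst ln 0 0 (-1)
  PySem.List.slice r.1 none (some (r.2 : Int))   -- lst[:i]

-- ===== PORT B =====
def stepB (st : List (List String) × List String) (x : String) :
    List (List String) × List String :=
  if x = " " then (if st.2 ≠ [] then (st.1 ++ [st.2], []) else st)
  else (st.1, st.2 ++ [x])

def finishB (st : List (List String) × List String) : List (List String) :=
  if st.2 ≠ [] then st.1 ++ [st.2] else st.1

def custom_strip_alt (lst : List String) : List String :=
  let runs := finishB (lst.foldl stepB ([], []))
  runs.foldl (fun out r => (if out ≠ [] then out ++ [" "] else out) ++ r) []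

-- ===== PRECONDITION & SPEC =====
def Spec_custom_strip (lst : List String) (out : List String) : Prop := out = custom_strip_alt lst
instance (lst : List String) (out : List String) : Decidable (Spec_custom_strip lst out) := by unfold Spec_custom_strip; infer_instance

-- ===== CLAIM (what is proved, stated in full; the proofs are below) =====
def Claim_equal_custom_strip : Prop := ∀ (lst : List String), Dom_custom_strip lst → Spec_custom_strip lst (custom_strip lst)

-- ===== LEMMAS AND PROOFS =====

-- canonical specification: the words (maximal runs of non-" " elements) of a list
def words : List String → List (List String)
  | [] => []
  | x :: xs =>
      if x = " " then words xs
      else (x :: xs.takeWhile (· ≠ " ")) :: words (xs.dropWhile (· ≠ " "))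
termination_by xs => xs.length
decreasing_by
  · simp
  · simp only [List.length_cons]
    exact Nat.lt_succ_of_le (List.length_dropWhile_le _ xs)

def joinW : List (List String) → List String
  | [] => []
  | w :: ws => w ++ ws.flatMap (fun u => " " :: u)

theorem flatMap_join (ws : List (List String)) :
    ws.flatMap (fun u => " " :: u) = (if ws ≠ [] then [" "] else []) ++ joinW ws := by
  cases ws <;> simp [joinW]

theorem words_ne (xs : List String) : ∀ w ∈ words xs, w ≠ [] := by
  induction hk : xs.length using Nat.strong_induction_on generalizing xs with
  | _ k ih =>
    cases xs with
    | nil => simp [words]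
    | cons x xs =>
      rw [words]
      by_cases hx : x = " "
      · rw [if_pos hx]
        exact ih xs.length (by simp [← hk]) xs rfl
      · rw [if_neg hx]
        intro w hw
        rcases List.mem_cons.mp hw with h | h
        · subst h; simp
        · refine ih (xs.dropWhile (· ≠ " ")).length ?_ _ rfl w h
          have := List.length_dropWhile_le (fun x : String => decide (x ≠ " ")) xs
          simp only [List.length_cons] at hk
          omega

theorem words_dropSpaces (xs : List String) :
    words (xs.dropWhile (· = " ")) = words xs := by
  induction xs with
  | nil => simp
  | cons x xs ih =>
    by_cases hx : x = " "
    · rw [List.dropWhile_cons, if_pos (by simp [hx]), ih, words, if_pos hx]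
    · rw [List.dropWhile_cons, if_neg (by simp [hx])]

theorem words_cons_space (x : String) (xs : List String) (h : x = " ") :
    words (x :: xs) = words xs := by
  rw [words.eq_def]; simp [h]

theorem words_cons_word (x : String) (xs : List String) (h : ¬ x = " ") :
    words (x :: xs) = (x :: xs.takeWhile (· ≠ " ")) :: words (xs.dropWhile (· ≠ " ")) := by
  rw [words.eq_def]; simp [h]

-- ----- B computes joinW ∘ words -----
theorem foldB_words (xs : List String) : ∀ (runs : List (List String)) (cur : List String),
    finishB (xs.foldl stepB (runs, cur)) =
      runs ++ (if cur = [] then words xs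
               else (cur ++ xs.takeWhile (· ≠ " ")) :: words (xs.dropWhile (· ≠ " "))) := by
  induction xs with
  | nil =>
    intro runs cur
    by_cases hc : cur = [] <;> simp [finishB, hc, words]
  | cons x xs ih =>
    intro runs cur
    simp only [List.foldl_cons]
    by_cases hx : x = " "
    · by_cases hc : cur = []
      · rw [show stepB (runs, cur) x = (runs, cur) by simp [stepB, hx, hc], ih]
        simp [hc, words_cons_space x xs hx]
      · rw [show stepB (runs, cur) x = (runs ++ [cur], []) by simp [stepB, hx, hc],
          ih (runs ++ [cur]) []]
        simp [hc, hx]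
        rw [words_cons_space " " xs rfl]
    · rw [show stepB (runs, cur) x = (runs, cur ++ [x]) by simp [stepB, hx],
        ih runs (cur ++ [x])]
      by_cases hc : cur = [] <;> simp [hc, words_cons_word x xs hx, hx]

theorem foldJoin_ne (ws : List (List String)) : ∀ out : List String, out ≠ [] →
    ws.foldl (fun out r => (if out ≠ [] then out ++ [" "] else out) ++ r) out =
      out ++ ws.flatMap (fun u => " " :: u) := by
  induction ws with
  | nil => intro out _; simp
  | cons w ws ih =>
    intro out hout
    simp only [List.foldl_cons, if_pos hout, List.flatMap_cons]
    rw [ih (out ++ [" "] ++ w) (by simp)]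
    simp

theorem alt_eq (lst : List String) : custom_strip_alt lst = joinW (words lst) := by
  unfold custom_strip_alt
  have h0 : finishB (lst.foldl stepB ([], [])) = words lst := by
    rw [foldB_words lst [] []]; simp
  rw [h0]
  cases h : words lst with
  | nil => simp [joinW]
  | cons w ws =>
    have hw : w ≠ [] := words_ne lst w (h ▸ List.mem_cons_self ..)
    simp only [List.foldl_cons, if_neg (by trivial : ¬(([] : List String) ≠ [])),
      List.nil_append]
    rw [foldJoin_ne ws w hw]
    rfl

-- ----- A computes joinW ∘ words -----
theorem set_take_succ : ∀ (l : List String) (i : Nat) (a : String), i < l.length →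
    (l.set i a).take (i + 1) = l.take i ++ [a] := by
  intro l
  induction l with
  | nil => intro i a h; simp at h
  | cons x xs ih =>
    intro i a h
    cases i with
    | zero => simp
    | succ i =>
      simp only [List.length_cons] at h
      simp [List.set_cons_succ, List.take_succ_cons, ih i a (by omega)]

theorem dropWhile_head_not (p : String → Bool) : ∀ (l : List String) (y : String)
    (ys : List String), l.dropWhile p = y :: ys → p y = false := by
  intro l
  induction l with
  | nil => intro y ys h; simp at h
  | cons x xs ih =>
    intro y ys h
    rw [List.dropWhile_cons] at h
    by_cases hp : p x = true
    · exact ih y ys (by rwa [if_pos hp] at h)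
    · rw [if_neg hp] at h
      cases h
      simpa using hp

theorem getD_getElem (lst : List String) (j : Nat) (h : j < lst.length) :
    lst.getD j "" = lst[j] := by
  rw [List.getD_eq_getElem?_getD, List.getElem?_eq_getElem h]
  rfl

theorem skipA_spec (lst : List String) : ∀ (fuel j : Nat), lst.length - j ≤ fuel →
    skipA fuel lst lst.length j = j + ((lst.drop j).takeWhile (· = " ")).length := by
  intro fuel
  induction fuel with
  | zero =>
    intro j hf
    rw [List.drop_eq_nil_of_le (by omega)]
    simp [skipA]
  | succ fuel ih =>
    intro j hf
    simp only [skipA]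
    by_cases h : j < lst.length ∧ lst.getD j "" = " "
    · rw [if_pos h, ih (j + 1) (by omega)]
      have hx : lst[j] = " " := by rw [← getD_getElem lst j h.1]; exact h.2
      rw [List.drop_eq_getElem_cons h.1, List.takeWhile_cons, if_pos (by simp [hx])]
      simp only [List.length_cons]
      omega
    · rw [if_neg h]
      by_cases hj : j < lst.length
      · have hx : ¬ (lst[j] = " ") := fun hx =>
          h ⟨hj, by rw [getD_getElem lst j hj]; exact hx⟩
        rw [List.drop_eq_getElem_cons hj, List.takeWhile_cons, if_neg (by simp [hx])]
        simp
      · rw [List.drop_eq_nil_of_le (by omega)]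
        simp

theorem copyA_spec : ∀ (fuel : Nat) (lst : List String) (i j : Nat) (last : Int),
    lst.length - j ≤ fuel → i ≤ j → j ≤ lst.length →
    (copyA fuel lst lst.length i j last).2.1 = i + ((lst.drop j).takeWhile (· ≠ " ")).length ∧
    (copyA fuel lst lst.length i j last).2.2.1 = j + ((lst.drop j).takeWhile (· ≠ " ")).length ∧
    (copyA fuel lst lst.length i j last).2.2.2 =
      (if ((lst.drop j).takeWhile (· ≠ " ")).length = 0 then last
       else ((i : Int) + ((lst.drop j).takeWhile (· ≠ " ")).length)) ∧
    (copyA fuel lst lst.length i j last).1.length = lst.length ∧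
    (copyA fuel lst lst.length i j last).1.take
        (i + ((lst.drop j).takeWhile (· ≠ " ")).length) =
      lst.take i ++ (lst.drop j).takeWhile (· ≠ " ") ∧
    (copyA fuel lst lst.length i j last).1.drop
        (j + ((lst.drop j).takeWhile (· ≠ " ")).length) =
      (lst.drop j).dropWhile (· ≠ " ") := by
  intro fuel
  induction fuel with
  | zero =>
    intro lst i j last hf hij hjl
    have hnil : lst.drop j = [] := List.drop_eq_nil_of_le (by omega)
    rw [hnil]
    simp [copyA, hnil]
  | succ fuel ih =>
    intro lst i j last hf hij hjl
    simp only [copyA]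
    by_cases h : j < lst.length ∧ lst.getD j "" ≠ " "
    · have hx : ¬ (lst[j] = " ") := fun hx => h.2 (by rw [getD_getElem lst j h.1]; exact hx)
      have hcons : lst.drop j = lst[j] :: lst.drop (j + 1) := List.drop_eq_getElem_cons h.1
      have hw : (lst.drop j).takeWhile (· ≠ " ") =
          lst[j] :: (lst.drop (j + 1)).takeWhile (· ≠ " ") := by
        rw [hcons, List.takeWhile_cons, if_pos (by simp [hx])]
      have hdw : (lst.drop j).dropWhile (· ≠ " ") =
          (lst.drop (j + 1)).dropWhile (· ≠ " ") := by
        rw [hcons, List.dropWhile_cons, if_pos (by simp [hx])]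
      have hdropeq : (lst.set i (lst.getD j "")).drop (j + 1) = lst.drop (j + 1) := by
        rw [List.drop_set, if_pos (by omega)]
      have hIH := ih (lst.set i (lst.getD j "")) (i + 1) (j + 1) ((i : Int) + 1)
        (by simp; omega) (by omega) (by simp; omega)
      simp only [List.length_set] at hIH
      rw [hdropeq] at hIH
      rw [if_pos h]
      rw [hw]
      obtain ⟨h1, h2, h3, h4, h5, h6⟩ := hIH
      refine ⟨by rw [h1]; simp; omega, by rw [h2]; simp; omega, ?_, by rw [h4], ?_, ?_⟩
      · rw [h3]
        simp only [List.length_cons]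
        rw [if_neg (show ¬(((lst.drop (j + 1)).takeWhile (· ≠ " ")).length + 1 = 0) by omega)]
        by_cases hz : ((lst.drop (j + 1)).takeWhile (· ≠ " ")).length = 0
        · rw [if_pos hz, hz]
          simp
        · rw [if_neg hz]
          push_cast
          ring
      · have harith : i + (lst[j] :: (lst.drop (j + 1)).takeWhile (· ≠ " ")).length =
            (i + 1) + ((lst.drop (j + 1)).takeWhile (· ≠ " ")).length := by simp; omega
        rw [harith, h5, set_take_succ lst i (lst.getD j "") (by omega),
          getD_getElem lst j h.1]
        simp
      · have harith : j + (lst[j] :: (lst.drop (j + 1)).takeWhile (· ≠ " ")).length =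
            (j + 1) + ((lst.drop (j + 1)).takeWhile (· ≠ " ")).length := by simp; omega
        rw [harith, h6, ← hdw]
    · have hw : (lst.drop j).takeWhile (· ≠ " ") = [] := by
        by_cases hj : j < lst.length
        · have hx : lst[j] = " " := by
            by_contra hc
            exact h ⟨hj, by rw [getD_getElem lst j hj]; exact fun he => hc he⟩
          rw [List.drop_eq_getElem_cons hj, List.takeWhile_cons, if_neg (by simp [hx])]
        · rw [List.drop_eq_nil_of_le (by omega)]
          simp
      have hdw : (lst.drop j).dropWhile (· ≠ " ") = lst.drop j := by
        by_cases hj : j < lst.length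
        · have hx : lst[j] = " " := by
            by_contra hc
            exact h ⟨hj, by rw [getD_getElem lst j hj]; exact fun he => hc he⟩
          rw [List.drop_eq_getElem_cons hj, List.dropWhile_cons, if_neg (by simp [hx])]
        · rw [List.drop_eq_nil_of_le (by omega)]
          simp
      rw [if_neg h, hw, hdw]
      simp

theorem takeWhile_len_le (p : String → Bool) : ∀ l : List String,
    (l.takeWhile p).length ≤ l.length := by
  intro l
  induction l with
  | nil => simp
  | cons x xs ih =>
    rw [List.takeWhile_cons]
    by_cases hp : p x = true
    · rw [if_pos hp]; simpa using ih
    · rw [if_neg hp]; simp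

theorem dropWhile_eq_drop (p : String → Bool) : ∀ l : List String,
    l.dropWhile p = l.drop (l.takeWhile p).length := by
  intro l
  induction l with
  | nil => simp
  | cons x xs ih =>
    rw [List.dropWhile_cons, List.takeWhile_cons]
    by_cases hp : p x = true
    · rw [if_pos hp, if_pos hp, ih]
      simp
    · rw [if_neg hp, if_neg hp]
      simp

theorem outer_spec : ∀ (fuel : Nat) (lst : List String) (i j : Nat) (last : Int),
    lst.length - j < fuel → j ≤ lst.length → i ≤ j →
    ((last = -1 ∧ i = 0) ∨ (last = (i : Int) ∧ (j < lst.length → lst.getD j "" = " "))) →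
    (outerA fuel lst lst.length i j last).1.take (outerA fuel lst lst.length i j last).2 =
      lst.take i ++ (if last = (i : Int) ∧ words (lst.drop j) ≠ [] then [" "] else []) ++
        joinW (words (lst.drop j)) := by
  intro fuel
  induction fuel with
  | zero =>
    intro lst i j last hk hjl hij hinv
    exact absurd hk (by omega)
  | succ fuel ih =>
    intro lst i j last hk hjl hij hinv
    simp only [outerA]
    by_cases hj : j < lst.length
    case neg =>
      rw [if_neg hj, List.drop_eq_nil_of_le (by omega)]
      simp [words, joinW]
    case pos =>
    rw [if_pos hj]
    simp only [stepA, skipA_spec lst lst.length j (by omega)]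
    have hsple : ((lst.drop j).takeWhile (· = " ")).length ≤ lst.length - j := by
      have h1 := takeWhile_len_le (fun x : String => decide (x = " ")) (lst.drop j)
      simp only [List.length_drop] at h1
      omega
    have hdrop1 : lst.drop (j + ((lst.drop j).takeWhile (· = " ")).length) =
        (lst.drop j).dropWhile (· = " ") := by
      rw [dropWhile_eq_drop, List.drop_drop]
    cases hr : (lst.drop j).dropWhile (· = " ") with
    | nil =>
      -- all remaining elements are spaces: the loop stops after skipping them
      have hj1 : j + ((lst.drop j).takeWhile (· = " ")).length = lst.length := by
        have := congrArg List.length (hr ▸ hdrop1)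
        simp only [List.length_drop, List.length_nil] at this
        omega
      rw [if_neg (fun hc => absurd hc.1 (by omega))]
      have hdj1 : lst.drop (j + ((lst.drop j).takeWhile (· = " ")).length) = [] := hr ▸ hdrop1
      have hspec := copyA_spec lst.length lst i
        (j + ((lst.drop j).takeWhile (· = " ")).length) last (by omega) (by omega) (by omega)
      rw [hdj1] at hspec
      simp only [List.takeWhile_nil, List.dropWhile_nil, List.length_nil, Nat.add_zero] at hspec
      obtain ⟨h1, h2, h3, h4, h5, h6⟩ := hspec
      rw [h1, h2, h3, if_pos trivial]
      dsimp only
      have hIH := ih (copyA lst.length lst lst.length i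
          (j + ((lst.drop j).takeWhile (· = " ")).length) last).1 i (j + ((lst.drop j).takeWhile (· = " ")).length) last
        (by rw [h4]; omega) (by rw [h4]; omega) (by omega)
        (by
          rcases hinv with hl | ⟨ha, _⟩
          · exact Or.inl hl
          · exact Or.inr ⟨ha, fun hc => absurd hc (by rw [h4]; omega)⟩)
      rw [h4] at hIH
      rw [hIH, h6]
      simp only [List.append_nil] at h5
      rw [h5]
      have hwnil : words (lst.drop j) = [] := by
        rw [← words_dropSpaces (lst.drop j), hr, words]
      simp [hwnil, words, joinW]
    | cons y ys =>
      have hy : ¬ (y = " ") := by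
        have := dropWhile_head_not (fun x => decide (x = " ")) (lst.drop j) y ys hr
        simpa using this
      have hdj1 : lst.drop (j + ((lst.drop j).takeWhile (· = " ")).length) = y :: ys :=
        hr ▸ hdrop1
      have hj1lt : j + ((lst.drop j).takeWhile (· = " ")).length < lst.length := by
        have := congrArg List.length hdj1
        simp only [List.length_drop, List.length_cons] at this
        omega
      have hwle : ((y :: ys).takeWhile (· ≠ " ")).length ≤ (y :: ys).length :=
        takeWhile_len_le _ _
      have hwcons : (y :: ys).takeWhile (· ≠ " ") = y :: ys.takeWhile (· ≠ " ") := by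
        rw [List.takeWhile_cons, if_pos (by simp [hy])]
      have hwpos : 0 < ((y :: ys).takeWhile (· ≠ " ")).length := by
        rw [hwcons]; simp
      have hlendrop : (y :: ys).length = lst.length -
          (j + ((lst.drop j).takeWhile (· = " ")).length) := by
        have := congrArg List.length hdj1
        simpa [List.length_drop] using this.symm
      have hwordsj : words (lst.drop j) =
          (y :: ys).takeWhile (· ≠ " ") :: words ((y :: ys).dropWhile (· ≠ " ")) := by
        rw [← words_dropSpaces (lst.drop j), hr, words_cons_word y ys hy, hwcons,
          List.dropWhile_cons, if_pos (by simp [hy])]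
      rcases hinv with ⟨hlast, hi0⟩ | ⟨hlast, hgd⟩
      · -- before the first word: no separator is written
        rw [if_neg (show ¬(j + ((lst.drop j).takeWhile (fun x : String => decide (x = " "))).length <
              lst.length ∧ last = (i : Int)) from
            fun hc => by rw [hlast, hi0] at hc; exact absurd hc.2 (by norm_num))]
        rw [if_neg (show ¬(last = (i : Int) ∧ words (lst.drop j) ≠ []) from
            fun hc => by rw [hlast, hi0] at hc; exact absurd hc.1 (by norm_num))]
        dsimp only
        have hspec := copyA_spec lst.length lst i
          (j + ((lst.drop j).takeWhile (· = " ")).length) last (by omega) (by omega) (by omega)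
        rw [hdj1] at hspec
        obtain ⟨h1, h2, h3, h4, h5, h6⟩ := hspec
        rw [h1, h2, h3, if_neg (show ¬(((y :: ys).takeWhile (· ≠ " ")).length = 0) by omega)]
        have hIH := ih (copyA lst.length lst lst.length i
            (j + ((lst.drop j).takeWhile (· = " ")).length) last).1
          (i + ((y :: ys).takeWhile (· ≠ " ")).length)
          (j + ((lst.drop j).takeWhile (· = " ")).length + ((y :: ys).takeWhile (· ≠ " ")).length)
          ((i : Int) + ((y :: ys).takeWhile (· ≠ " ")).length)
          (by rw [h4]; omega) (by rw [h4]; omega) (by omega)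
          (by
            refine Or.inr ⟨by push_cast; ring, fun hc => ?_⟩
            rw [h4] at hc
            have hcons2 := List.drop_eq_getElem_cons (l := (copyA lst.length lst lst.length i
              (j + ((lst.drop j).takeWhile (· = " ")).length) last).1)
              (i := j + ((lst.drop j).takeWhile (· = " ")).length +
                ((y :: ys).takeWhile (· ≠ " ")).length) (by rw [h4]; exact hc)
            rw [h6] at hcons2
            have hh := dropWhile_head_not (fun x => decide (x ≠ " ")) (y :: ys) _ _ hcons2
            rw [getD_getElem _ _ (by rw [h4]; exact hc)]
            simpa using hh)
        rw [h4] at hIH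
        rw [hIH, h6, h5, hwordsj]
        rw [joinW]
        simp [flatMap_join, List.append_assoc]
      · -- after a word: the separator " " is written before copying the next word
        have hx : lst[j] = " " := by rw [← getD_getElem lst j hj]; exact hgd hj
        have hsp1 : 1 ≤ ((lst.drop j).takeWhile (· = " ")).length := by
          rw [List.drop_eq_getElem_cons hj, List.takeWhile_cons, if_pos (by simp [hx])]
          simp
        rw [if_pos (show j + ((lst.drop j).takeWhile (fun x : String => decide (x = " "))).length <
              lst.length ∧ last = (i : Int) from ⟨hj1lt, hlast⟩)]
        dsimp only
        have hdropS : (lst.set i " ").drop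
            (j + ((lst.drop j).takeWhile (· = " ")).length) = y :: ys := by
          rw [List.drop_set, if_pos (by omega)]
          exact hdj1
        have hspec := copyA_spec lst.length (lst.set i " ") (i + 1)
          (j + ((lst.drop j).takeWhile (· = " ")).length) last
          (by simp only [List.length_set]; omega) (by omega)
          (by simp only [List.length_set]; omega)
        simp only [List.length_set] at hspec
        rw [hdropS] at hspec
        obtain ⟨h1, h2, h3, h4, h5, h6⟩ := hspec
        rw [h1, h2, h3, if_neg (show ¬(((y :: ys).takeWhile (· ≠ " ")).length = 0) by omega)]
        have hIH := ih (copyA lst.length (lst.set i " ") lst.length (i + 1)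
            (j + ((lst.drop j).takeWhile (· = " ")).length) last).1
          (i + 1 + ((y :: ys).takeWhile (· ≠ " ")).length)
          (j + ((lst.drop j).takeWhile (· = " ")).length + ((y :: ys).takeWhile (· ≠ " ")).length)
          (((i + 1 : Nat) : Int) + ((y :: ys).takeWhile (· ≠ " ")).length)
          (by rw [h4]; omega) (by rw [h4]; omega) (by omega)
          (by
            refine Or.inr ⟨by push_cast; ring, fun hc => ?_⟩
            rw [h4] at hc
            have hcons2 := List.drop_eq_getElem_cons (l := (copyA lst.length (lst.set i " ") lst.length
              (i + 1) (j + ((lst.drop j).takeWhile (· = " ")).length) last).1)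
              (i := j + ((lst.drop j).takeWhile (· = " ")).length +
                ((y :: ys).takeWhile (· ≠ " ")).length) (by rw [h4]; exact hc)
            rw [h6] at hcons2
            have hh := dropWhile_head_not (fun x => decide (x ≠ " ")) (y :: ys) _ _ hcons2
            rw [getD_getElem _ _ (by rw [h4]; exact hc)]
            simpa using hh)
        rw [h4] at hIH
        rw [hIH, h6, h5, set_take_succ lst i " " (by omega), hwordsj]
        rw [joinW]
        simp [hlast, flatMap_join, List.append_assoc]

theorem a_eq (lst : List String) : custom_strip lst = joinW (words lst) := by
  unfold custom_strip
  dsimp only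
  rw [PySem.List.slice_to_natCast]
  have h := outer_spec (lst.length + 1) lst 0 0 (-1) (by omega) (by omega) (by omega)
    (Or.inl ⟨rfl, rfl⟩)
  simp only [List.drop_zero, List.take_zero, List.nil_append] at h
  rw [h]
  norm_num

-- ===== VERDICT (by name: the statement is the Claim_ definition above) =====
theorem custom_strip_spec : Claim_equal_custom_strip := by
  intro lst _
  unfold Spec_custom_strip
  rw [a_eq, alt_eq]
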